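-- pv_equiv track=rewrite | github.com/lggruspe/slipbox | cli/slipbox/app.py | find_available_id
-- ===== SOURCE A (Python) =====
-- from typing import Optional, Sequence
--
-- def has_gaps(sequence: Sequence[int]) -> bool:
--     """Check if sequence has gaps.
--
--     Assume sequence is an increasing sequence of non-negative integers with no
--     duplicate entries.
--     """
--     return bool(sequence) and (sequence[-1] - sequence[0] >= len(sequence))
--
-- def find_available_id(sequence: Sequence[int]) -> int:
--     """Return smallest non-negative integer not in the sequence."""
--     if not sequence or sequence[0] > 0:
--         return 0
--     if not has_gaps(sequence):
--         return sequence[-1] + 1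
--     while len(sequence) > 2:
--         mid = len(sequence) // 2
--         lower = sequence[:mid]
--         boundary = sequence[mid-1:mid+1]
--         upper = sequence[mid:]
--         sequence = lower if has_gaps(lower) \
--             else boundary if has_gaps(boundary) \
--             else upper
--     return sequence[0] + 1
-- ===== SOURCE B (Python) =====
-- def _ascent(d, i, j):
--     """Some index k with d[k] < d[k + 1], given that d[i] < d[j - 1].
--
--     Classic divide-and-conquer for a local ascent: if d still ascends
--     across the lower half, descend there; otherwise the lower half's last
--     element is a local minimum of the two middle cells, so either they
--     ascend (done) or d still ascends across the upper half.
--     """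
--     if j - i <= 2:
--         return i
--     mid = (j - i) // 2
--     if d[i] < d[i + mid - 1]:
--         return _ascent(d, i, i + mid)
--     if d[i + mid - 1] < d[i + mid]:
--         return i + mid - 1
--     return _ascent(d, i + mid, j)
--
--
-- def find_available_id(sequence):
--     """Return smallest non-negative integer not in the sequence.
--
--     Reformulation on the difference array d[k] = sequence[k] - k: a block
--     of the sequence 'has gaps' exactly when d ascends across it, and the
--     id A reports sits right after an adjacent ascent of d.  So build d
--     once and hand it to the ascent finder; no slicing, no has_gaps.
--     """
--     d = [x - i for i, x in enumerate(sequence)]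
--     if not d or d[0] > 0:
--         return 0
--     if d[-1] <= d[0]:
--         return sequence[-1] + 1
--     return sequence[_ascent(d, 0, len(d))] + 1
-- ===== Notes on version B (the rewrite author's own statement) =====
-- stated objective: alternative
-- what changed: A hunts for the gap with a while-loop that re-slices the list into lower/boundary/upper copies and re-tests a last-minus-first has_gaps predicate on each copy; B reformulates on the difference array d[k]=sequence[k]-k (a block has gaps exactly when d ascends across it), builds d once, and finds an adjacent ascent of d with the classic recursive local-ascent search with an early return; equal to A on every input, no precondition.
import Mathlib
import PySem

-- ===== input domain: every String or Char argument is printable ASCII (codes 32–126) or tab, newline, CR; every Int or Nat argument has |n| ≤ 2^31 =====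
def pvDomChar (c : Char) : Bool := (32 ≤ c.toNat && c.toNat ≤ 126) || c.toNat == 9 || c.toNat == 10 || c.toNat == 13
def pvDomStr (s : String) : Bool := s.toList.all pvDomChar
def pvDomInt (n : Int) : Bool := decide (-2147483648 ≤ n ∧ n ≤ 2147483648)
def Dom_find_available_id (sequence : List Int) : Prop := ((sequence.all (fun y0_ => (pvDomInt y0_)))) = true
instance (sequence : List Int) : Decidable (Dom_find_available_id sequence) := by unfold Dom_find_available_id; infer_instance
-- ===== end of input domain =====

-- B replaces A's slice-and-has_gaps hunt by one pass building the difference array d[k] = s[k] - k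
-- and a recursive local-ascent search on d; equal to A on every list of integers (no Pre_).


-- ===== PORT A =====
-- helper has_gaps: bool(sequence) and (sequence[-1] - sequence[0] >= len(sequence))
def pyHasGaps (s : List Int) : Bool :=
  !s.isEmpty && decide ((s.length : Int) ≤ PySem.List.pyGetD s (-1) 0 - PySem.List.pyGetD s 0 0)

-- the 'while len(sequence) > 2' loop of A, returning the final value of 'sequence'
def findLoop (s : List Int) : List Int :=
  if _h : 2 < s.length then
    let mid : Int := PySem.Int.floordiv (s.length : Int) 2
    let lower := PySem.List.slice s none (some mid)
    let boundary := PySem.List.slice s (some (mid - 1)) (some (mid + 1))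
    let upper := PySem.List.slice s (some mid) none
    findLoop (if pyHasGaps lower then lower else if pyHasGaps boundary then boundary else upper)
  else s
termination_by s.length
decreasing_by
  have hm : PySem.Int.floordiv (s.length : Int) 2 = ((s.length / 2 : Nat) : Int) := by
    exact_mod_cast PySem.Int.floordiv_natCast s.length 2
  have hm1 : ((s.length / 2 : Nat) : Int) - 1 = ((s.length / 2 - 1 : Nat) : Int) := by omega
  have hm2 : ((s.length / 2 : Nat) : Int) + 1 = ((s.length / 2 + 1 : Nat) : Int) := by omega
  simp only [hm, hm1, hm2, PySem.List.slice_to_natCast,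
    PySem.List.slice_from_natCast, PySem.List.slice_natCast]
  split_ifs <;> simp [List.length_take, List.length_drop] <;> omega

def find_available_id (sequence : List Int) : Int :=
  if sequence.isEmpty || decide (0 < PySem.List.pyGetD sequence 0 0) then 0
  else if !pyHasGaps sequence then PySem.List.pyGetD sequence (-1) 0 + 1
  else PySem.List.pyGetD (findLoop sequence) 0 0 + 1

-- ===== PORT B =====
-- helper _ascent(d, i, j): recursive local-ascent search on the difference array
def ascentRec (d : List Int) (i j : Int) : Int :=
  if _h : j - i ≤ 2 then i
  else
    let mid : Int := PySem.Int.floordiv (j - i) 2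
    if PySem.List.pyGetD d i 0 < PySem.List.pyGetD d (i + mid - 1) 0 then
      ascentRec d i (i + mid)
    else if PySem.List.pyGetD d (i + mid - 1) 0 < PySem.List.pyGetD d (i + mid) 0 then
      i + mid - 1
    else ascentRec d (i + mid) j
termination_by (j - i).toNat
decreasing_by
  all_goals
    have hm : PySem.Int.floordiv (j - i) 2 = (j - i) / 2 :=
      PySem.Int.floordiv_eq_ediv_of_pos (by omega)
    simp only [hm]
    omega

def find_available_id_alt (sequence : List Int) : Int :=
  -- d = [x - i for i, x in enumerate(sequence)]  (zipIdx pairs are (x, i))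
  let d : List Int := sequence.zipIdx.map (fun p => p.1 - (p.2 : Int))
  if d.isEmpty || decide (0 < PySem.List.pyGetD d 0 0) then 0
  else if PySem.List.pyGetD d (-1) 0 ≤ PySem.List.pyGetD d 0 0 then
    PySem.List.pyGetD sequence (-1) 0 + 1
  else PySem.List.pyGetD sequence (ascentRec d 0 (d.length : Int)) 0 + 1

-- ===== PRECONDITION & SPEC =====
-- (no Pre_: both Pythons return normally on every list of integers)
def Spec_find_available_id (sequence : List Int) (out : Int) : Prop :=
  out = find_available_id_alt sequence
instance (sequence : List Int) (out : Int) : Decidable (Spec_find_available_id sequence out) := by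
  unfold Spec_find_available_id; infer_instance

-- ===== CLAIM (what is proved, stated in full; the proofs are below) =====
def Claim_equal_find_available_id : Prop := ∀ (sequence : List Int), Dom_find_available_id sequence → Spec_find_available_id sequence (find_available_id sequence)

-- ===== LEMMAS AND PROOFS =====

theorem pyHasGaps_cons (x : Int) (xs : List Int) :
    pyHasGaps (x :: xs) = true ↔
      (((x :: xs).length : Int) ≤ (x :: xs).getLast (by simp) - x) := by
  simp only [pyHasGaps]
  rw [PySem.List.pyGetD_neg_one (x :: xs) 0 (by simp)]
  simp

theorem pyHasGaps_true_iff (l : List Int) (h : l ≠ []) :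
    pyHasGaps l = true ↔ (l.length : Int) ≤ l.getLast h - l.getD 0 0 := by
  cases l with
  | nil => exact absurd rfl h
  | cons x xs => simpa using pyHasGaps_cons x xs

-- proof-side helper: A's loop rewritten on an index window [i, j) (no slicing);
-- window_eq shows it traces A's loop, ascent_eq_bWindow relates it to B's search.
def bWindow (s : List Int) (i j : Int) : Int :=
  if _h : 2 < j - i then
    let mid : Int := PySem.Int.floordiv (j - i) 2
    if PySem.List.pyGetD s (i + mid - 1) 0 - PySem.List.pyGetD s i 0 ≥ mid then
      bWindow s i (i + mid)
    else if PySem.List.pyGetD s (i + mid) 0 - PySem.List.pyGetD s (i + mid - 1) 0 ≥ 2 then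
      bWindow s (i + mid - 1) (i + mid + 1)
    else
      bWindow s (i + mid) j
  else i
termination_by (j - i).toNat
decreasing_by
  all_goals
    have hm : PySem.Int.floordiv (j - i) 2 = (j - i) / 2 :=
      PySem.Int.floordiv_eq_ediv_of_pos (by omega)
    simp only [hm]
    omega

-- endpoints of a window s[a : a+b]
theorem getD0_window (s : List Int) (a b : Nat) (hb : 0 < b) (hab : a + b ≤ s.length) :
    ((s.drop a).take b).getD 0 0 = s.getD a 0 := by
  rw [List.getD_eq_getElem _ _ (by simp; omega), List.getD_eq_getElem _ _ (by omega)]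
  simp [List.getElem_take, List.getElem_drop]

theorem getLast_window (s : List Int) (a b : Nat) (h : (s.drop a).take b ≠ [])
    (hb : 0 < b) (hab : a + b ≤ s.length) :
    ((s.drop a).take b).getLast h = s.getD (a + b - 1) 0 := by
  have hlen : ((s.drop a).take b).length = b := by simp; omega
  rw [List.getLast_eq_getElem, List.getD_eq_getElem _ _ (by omega)]
  rw [List.getElem_take, List.getElem_drop]
  congr 1
  rw [hlen]
  omega

theorem window_ne (s : List Int) (a b : Nat) (hb : 0 < b) (hab : a + b ≤ s.length) :
    (s.drop a).take b ≠ [] := by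
  intro h
  have h0 := congrArg List.length h
  simp at h0
  omega

-- has_gaps of a window in terms of its endpoint elements
theorem pyHasGaps_window (s : List Int) (a b : Nat) (hb : 0 < b) (hab : a + b ≤ s.length) :
    pyHasGaps ((s.drop a).take b) = true ↔ (b : Int) ≤ s.getD (a + b - 1) 0 - s.getD a 0 := by
  have hlen : ((s.drop a).take b).length = b := by simp; omega
  rw [pyHasGaps_true_iff _ (window_ne s a b hb hab), hlen,
    getLast_window s a b (window_ne s a b hb hab) hb hab, getD0_window s a b hb hab]

-- A's slice loop and the index-window loop narrow the same window
theorem window_eq (s : List Int) :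
    ∀ k i j : Nat, i < j → j ≤ s.length → j - i = k →
      PySem.List.pyGetD (findLoop ((s.drop i).take (j - i))) 0 0 =
      PySem.List.pyGetD s (bWindow s (i : Int) (j : Int)) 0 := by
  intro k
  induction k using Nat.strong_induction_on with
  | _ k ih =>
  intro i j hij hj hk
  have hlen_t : ((s.drop i).take (j - i)).length = j - i := by simp; omega
  by_cases h2 : 2 < j - i
  · -- both loops take a step
    rw [findLoop, dif_pos (by rw [hlen_t]; exact h2)]
    rw [bWindow, dif_pos (show (2:Int) < (j:Int) - (i:Int) by omega)]
    set m : Nat := (j - i) / 2 with hm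
    have hmpos : 1 ≤ m := by omega
    have hmlt : m + 2 ≤ j - i := by omega
    have hmidA : PySem.Int.floordiv ((((s.drop i).take (j - i)).length : Nat) : Int) 2 = (m : Int) := by
      rw [hlen_t]
      exact_mod_cast PySem.Int.floordiv_natCast (j - i) 2
    have hmidB : PySem.Int.floordiv ((j : Int) - (i : Int)) 2 = (m : Int) := by
      rw [show (j : Int) - (i : Int) = ((j - i : Nat) : Int) by omega]
      exact_mod_cast PySem.Int.floordiv_natCast (j - i) 2
    have hc1 : ((m : Nat) : Int) - 1 = ((m - 1 : Nat) : Int) := by omega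
    have hc2 : ((m : Nat) : Int) + 1 = ((m + 1 : Nat) : Int) := by omega
    simp only [hmidA, hmidB, hc1, hc2, PySem.List.slice_to_natCast,
      PySem.List.slice_from_natCast, PySem.List.slice_natCast]
    -- the three candidate windows, as windows of s
    have ht_take : ((s.drop i).take (j - i)).take m = (s.drop i).take m := by
      rw [List.take_take]
      congr 1
      omega
    have ht_drop : ∀ c : Nat, ((s.drop i).take (j - i)).drop c = (s.drop (i + c)).take (j - i - c) := by
      intro c
      rw [List.drop_take, List.drop_drop]
    have ht_bnd : ((s.drop (i + (m - 1))).take (j - i - (m - 1))).take (m + 1 - (m - 1)) =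
        (s.drop (i + m - 1)).take 2 := by
      rw [List.take_take, show min (m + 1 - (m - 1)) (j - i - (m - 1)) = 2 by omega,
        show i + (m - 1) = i + m - 1 by omega]
    rw [ht_take, ht_drop (m - 1), ht_drop m, ht_bnd]
    -- the window loop's index reads as getD
    have hb1 : (i : Int) + (m : Int) - 1 = ((i + m - 1 : Nat) : Int) := by omega
    have hb2 : (i : Int) + (m : Int) = ((i + m : Nat) : Int) := by omega
    rw [show PySem.List.pyGetD s ((i : Int) + (m : Int) - 1) 0 = s.getD (i + m - 1) 0 by
        rw [hb1, PySem.List.pyGetD_natCast],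
      show PySem.List.pyGetD s ((i : Int) + (m : Int)) 0 = s.getD (i + m) 0 by
        rw [hb2, PySem.List.pyGetD_natCast],
      show PySem.List.pyGetD s (i : Int) 0 = s.getD i 0 by rw [PySem.List.pyGetD_natCast]]
    by_cases hg1 : (m : Int) ≤ s.getD (i + m - 1) 0 - s.getD i 0
    · -- lower window is kept
      rw [if_pos ((pyHasGaps_window s i m hmpos (by omega)).mpr hg1),
        if_pos (show s.getD (i + m - 1) 0 - s.getD i 0 ≥ (m : Int) from hg1)]
      have h5 := ih m (by omega) i (i + m) (by omega) (by omega) (by omega)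
      rw [show i + m - i = m by omega] at h5
      rw [show (i : Int) + (m : Int) = ((i + m : Nat) : Int) by omega]
      exact h5
    · rw [if_neg (show ¬ (pyHasGaps ((s.drop i).take m) = true) from
          fun hc => hg1 ((pyHasGaps_window s i m hmpos (by omega)).mp hc)),
        if_neg (show ¬ (s.getD (i + m - 1) 0 - s.getD i 0 ≥ (m : Int)) from hg1)]
      have hbw : pyHasGaps ((s.drop (i + m - 1)).take 2) = true ↔
          (2 : Int) ≤ s.getD (i + m) 0 - s.getD (i + m - 1) 0 := by
        have h6 := pyHasGaps_window s (i + m - 1) 2 (by omega) (by omega)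
        rw [show i + m - 1 + 2 - 1 = i + m by omega] at h6
        exact_mod_cast h6
      by_cases hg2 : (2 : Int) ≤ s.getD (i + m) 0 - s.getD (i + m - 1) 0
      · -- boundary window is kept
        rw [if_pos (hbw.mpr hg2),
          if_pos (show s.getD (i + m) 0 - s.getD (i + m - 1) 0 ≥ (2 : Int) from hg2)]
        have h5 := ih 2 (by omega) (i + m - 1) (i + m + 1) (by omega) (by omega) (by omega)
        rw [show i + m + 1 - (i + m - 1) = 2 by omega] at h5
        rw [show (i : Int) + (m : Int) - 1 = ((i + m - 1 : Nat) : Int) by omega,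
          show (i : Int) + (m : Int) + 1 = ((i + m + 1 : Nat) : Int) by omega]
        exact h5
      · -- upper window is kept
        rw [if_neg (show ¬ (pyHasGaps ((s.drop (i + m - 1)).take 2) = true) from
            fun hc => hg2 (hbw.mp hc)),
          if_neg (show ¬ (s.getD (i + m) 0 - s.getD (i + m - 1) 0 ≥ (2 : Int)) from hg2)]
        have h5 := ih (j - i - m) (by omega) (i + m) j (by omega) (by omega) (by omega)
        rw [show j - (i + m) = j - i - m by omega] at h5
        rw [show (i : Int) + (m : Int) = ((i + m : Nat) : Int) by omega]
        exact h5
  · -- both loops stop; the window starts at s[i]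
    rw [findLoop, dif_neg (by rw [hlen_t]; exact h2)]
    rw [bWindow, dif_neg (show ¬ (2:Int) < (j:Int) - (i:Int) by omega)]
    rw [PySem.List.pyGetD_natCast, PySem.List.pyGetD_zero]
    exact getD0_window s i (j - i) (by omega) (by omega)

-- the difference array reads pointwise as s[k] - k
theorem dArr_getD (s : List Int) (k : Nat) (hk : k < s.length) :
    (s.zipIdx.map (fun p => p.1 - (p.2 : Int))).getD k 0 = s.getD k 0 - (k : Int) := by
  rw [List.getD_eq_getElem _ _ (by simp; omega), List.getD_eq_getElem _ _ hk]
  simp [List.getElem_zipIdx]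

theorem dArr_length (s : List Int) :
    (s.zipIdx.map (fun p => p.1 - (p.2 : Int))).length = s.length := by
  simp

-- B's ascent search makes exactly the index-window loop's decisions
theorem ascent_eq_bWindow (s : List Int) :
    ∀ w i j : Nat, j - i = w → j ≤ s.length →
      ascentRec (s.zipIdx.map (fun p => p.1 - (p.2 : Int))) (i : Int) (j : Int) =
      bWindow s (i : Int) (j : Int) := by
  intro w
  induction w using Nat.strong_induction_on with
  | _ w ih =>
  intro i j hw hj
  set d : List Int := s.zipIdx.map (fun p => p.1 - (p.2 : Int)) with hd
  by_cases h2 : 2 < j - i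
  · rw [ascentRec, dif_neg (show ¬ (j : Int) - (i : Int) ≤ 2 by omega)]
    rw [bWindow, dif_pos (show (2:Int) < (j:Int) - (i:Int) by omega)]
    set q : Nat := (j - i) / 2 with hq
    have hq1 : 1 ≤ q := by omega
    have hq2 : q + 2 ≤ j - i := by omega
    have hmid : PySem.Int.floordiv ((j : Int) - (i : Int)) 2 = (q : Int) := by
      rw [show (j : Int) - (i : Int) = ((j - i : Nat) : Int) by omega]
      exact_mod_cast PySem.Int.floordiv_natCast (j - i) 2
    have hb1 : (i : Int) + (q : Int) - 1 = ((i + q - 1 : Nat) : Int) := by omega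
    have hb2 : (i : Int) + (q : Int) = ((i + q : Nat) : Int) := by omega
    simp only [hmid]
    rw [show PySem.List.pyGetD d ((i : Int) + (q : Int) - 1) 0 = d.getD (i + q - 1) 0 by
        rw [hb1, PySem.List.pyGetD_natCast],
      show PySem.List.pyGetD d ((i : Int) + (q : Int)) 0 = d.getD (i + q) 0 by
        rw [hb2, PySem.List.pyGetD_natCast],
      show PySem.List.pyGetD d (i : Int) 0 = d.getD i 0 by rw [PySem.List.pyGetD_natCast],
      show PySem.List.pyGetD s ((i : Int) + (q : Int) - 1) 0 = s.getD (i + q - 1) 0 by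
        rw [hb1, PySem.List.pyGetD_natCast],
      show PySem.List.pyGetD s ((i : Int) + (q : Int)) 0 = s.getD (i + q) 0 by
        rw [hb2, PySem.List.pyGetD_natCast],
      show PySem.List.pyGetD s (i : Int) 0 = s.getD i 0 by rw [PySem.List.pyGetD_natCast]]
    have e0 : d.getD i 0 = s.getD i 0 - (i : Int) := dArr_getD s i (by omega)
    have e1 : d.getD (i + q - 1) 0 = s.getD (i + q - 1) 0 - ((i + q - 1 : Nat) : Int) :=
      dArr_getD s (i + q - 1) (by omega)
    have e2 : d.getD (i + q) 0 = s.getD (i + q) 0 - ((i + q : Nat) : Int) :=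
      dArr_getD s (i + q) (by omega)
    by_cases t1 : (q : Int) ≤ s.getD (i + q - 1) 0 - s.getD i 0
    · rw [if_pos (show d.getD i 0 < d.getD (i + q - 1) 0 by rw [e0, e1]; omega),
        if_pos (show s.getD (i + q - 1) 0 - s.getD i 0 ≥ (q : Int) from t1), hb2]
      exact ih (i + q - i) (by omega) i (i + q) rfl (by omega)
    · rw [if_neg (show ¬ d.getD i 0 < d.getD (i + q - 1) 0 by rw [e0, e1]; omega),
        if_neg (show ¬ s.getD (i + q - 1) 0 - s.getD i 0 ≥ (q : Int) from t1)]
      by_cases t2 : (2 : Int) ≤ s.getD (i + q) 0 - s.getD (i + q - 1) 0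
      · rw [if_pos (show d.getD (i + q - 1) 0 < d.getD (i + q) 0 by rw [e1, e2]; omega),
          if_pos (show s.getD (i + q) 0 - s.getD (i + q - 1) 0 ≥ (2 : Int) from t2)]
        -- the boundary window has width 2: the window loop returns its left end at once
        rw [bWindow, dif_neg (show ¬ (2:Int) < ((i:Int) + (q:Int) + 1) - ((i:Int) + (q:Int) - 1) by omega)]
      · rw [if_neg (show ¬ d.getD (i + q - 1) 0 < d.getD (i + q) 0 by rw [e1, e2]; omega),
          if_neg (show ¬ s.getD (i + q) 0 - s.getD (i + q - 1) 0 ≥ (2 : Int) from t2), hb2]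
        exact ih (j - (i + q)) (by omega) (i + q) j rfl hj
  · rw [ascentRec, dif_pos (show (j : Int) - (i : Int) ≤ 2 by omega)]
    rw [bWindow, dif_neg (show ¬ (2:Int) < (j:Int) - (i:Int) by omega)]

-- ===== VERDICT (by name: the statement is the Claim_ definition above) =====
theorem find_available_id_spec : Claim_equal_find_available_id := by
  intro s0 _
  unfold Spec_find_available_id
  cases s0 with
  | nil => simp [find_available_id, find_available_id_alt]
  | cons x s' =>
    simp only [find_available_id, find_available_id_alt]
    set s : List Int := x :: s' with hs
    set d : List Int := s.zipIdx.map (fun p => p.1 - (p.2 : Int)) with hd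
    set n : Nat := s.length with hn
    have hn1 : 1 ≤ n := by rw [hn, hs]; exact Nat.succ_le_succ (Nat.zero_le _)
    have hdl : d.length = n := dArr_length s
    have hdne : d ≠ [] := by
      intro hc
      have hlc := congrArg List.length hc
      rw [hdl] at hlc
      simp at hlc
      omega
    have hsne : s ≠ [] := by rw [hs]; simp
    have hget0s : PySem.List.pyGetD s 0 0 = s.getD 0 0 := PySem.List.pyGetD_zero s 0
    have hget0d : PySem.List.pyGetD d 0 0 = s.getD 0 0 := by
      rw [PySem.List.pyGetD_zero, hd, dArr_getD s 0 (by omega)]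
      simp
    have hgetlastd : PySem.List.pyGetD d (-1) 0 = s.getD (n - 1) 0 - ((n - 1 : Nat) : Int) := by
      rw [PySem.List.pyGetD_neg_one d 0 hdne, List.getLast_eq_getElem,
        ← List.getD_eq_getElem d 0 (by omega), hdl]
      exact dArr_getD s (n - 1) (by omega)
    have hlasts : s.getLast hsne = s.getD (n - 1) 0 := by
      rw [List.getLast_eq_getElem, List.getD_eq_getElem _ _ (by omega)]
    have hgapsiff : pyHasGaps s = true ↔ (n : Int) ≤ s.getD (n - 1) 0 - s.getD 0 0 := by
      rw [pyHasGaps_true_iff s hsne, hlasts, ← hn]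
    have hsE : s.isEmpty = false := by rw [hs]; rfl
    have hdE : d.isEmpty = false := by
      cases hcd : d.isEmpty
      · rfl
      · exact absurd (List.isEmpty_iff.mp hcd) hdne
    by_cases hx0 : 0 < s.getD 0 0
    · -- both return 0
      rw [if_pos (show (s.isEmpty || decide (0 < PySem.List.pyGetD s 0 0)) = true by
          rw [hget0s]
          simp only [decide_eq_true hx0, Bool.or_true])]
      rw [if_pos (show (d.isEmpty || decide (0 < PySem.List.pyGetD d 0 0)) = true by
          rw [hget0d]
          simp only [decide_eq_true hx0, Bool.or_true])]
    · rw [if_neg (show ¬ (s.isEmpty || decide (0 < PySem.List.pyGetD s 0 0)) = true by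
          rw [hget0s, hsE]
          simp only [Bool.false_or, decide_eq_true_eq]
          exact hx0)]
      rw [if_neg (show ¬ (d.isEmpty || decide (0 < PySem.List.pyGetD d 0 0)) = true by
          rw [hget0d, hdE]
          simp only [Bool.false_or, decide_eq_true_eq]
          exact hx0)]
      by_cases hg : pyHasGaps s = true
      · -- gap branch on both sides
        have hgv := hgapsiff.mp hg
        rw [if_neg (show ¬ (!pyHasGaps s) = true by simp [hg])]
        rw [if_neg (show ¬ (PySem.List.pyGetD d (-1) 0 ≤ PySem.List.pyGetD d 0 0) by
          rw [hgetlastd, hget0d]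
          omega)]
        have hweq := window_eq s n 0 n (by omega) (by omega) (by omega)
        have hts : s.take (n - 0) = s := List.take_of_length_le (by omega)
        rw [List.drop_zero, hts, Nat.cast_zero] at hweq
        have hasc := ascent_eq_bWindow s n 0 n (by omega) (by omega)
        rw [← hd, Nat.cast_zero] at hasc
        rw [hdl, hasc, hweq]
      · -- no-gap branch on both sides
        rw [if_pos (show (!pyHasGaps s) = true by simp [eq_false_of_ne_true hg])]
        rw [if_pos (show PySem.List.pyGetD d (-1) 0 ≤ PySem.List.pyGetD d 0 0 by
          rw [hgetlastd, hget0d]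
          have hgv : ¬ (n : Int) ≤ s.getD (n - 1) 0 - s.getD 0 0 := fun hc => hg (hgapsiff.mpr hc)
          omega)]
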